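-- pv_equiv track=rewrite | github.com/AnaVigario/logistica-amover | rotas/Cenario 1/BranchandBound.py | branch_and_bound_two_vehicles
-- ===== SOURCE A (Python) =====
-- import itertools
--
-- locations = {
--     "Depósito": (0, 0),
--     "A": (2, 3),
--     "B": (5, 8),
--     "C": (6, 1),
--     "D": (8, 6),
--     "E": (1, 9),
--     "F": (7, 4)
-- }
--
-- def calculate_route_distance(route, distance_matrix):
--     distance = 0
--     for i in range(len(route) - 1):
--         distance += distance_matrix[route[i]][route[i + 1]]
--     return distance
--
-- def branch_and_bound_two_vehicles(distance_matrix, demands, vehicle_capacity, battery_capacity):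
--     num_clients = len(demands) - 1  # Ignorar o depósito
--     clients = list(range(1, num_clients + 1))
--     depot_index = 0
--
--     best_routes = [[], []]  # Rotas para os dois veículos
--     best_distance = float('inf')
--
--     # Gerar todas as combinações possíveis de divisão entre dois veículos
--     for split in itertools.combinations(clients, len(clients) // 2):
--         vehicle_1_clients = list(split)
--         vehicle_2_clients = [c for c in clients if c not in vehicle_1_clients]
--
--         for perm1 in itertools.permutations(vehicle_1_clients):
--             for perm2 in itertools.permutations(vehicle_2_clients):
--                 routes = [[], []]
--                 total_distance = 0
--
--                 # Construir rota para o veículo 1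
--                 current_route = [depot_index]
--                 current_capacity = vehicle_capacity[0]
--                 current_battery = battery_capacity[0]
--
--                 for client in perm1:
--                     demand = demands[list(locations.keys())[client]]
--                     distance_to_client = distance_matrix[current_route[-1]][client]
--                     distance_back_to_depot = distance_matrix[client][depot_index]
--
--                     if current_capacity >= demand and current_battery >= (distance_to_client + distance_back_to_depot):
--                         current_route.append(client)
--                         current_capacity -= demand
--                         current_battery -= distance_to_client
--                     else:
--                         current_route.append(depot_index)
--                         routes[0].append(current_route)
--                         total_distance += calculate_route_distance(current_route, distance_matrix)
--                         current_route = [depot_index, client]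
--                         current_capacity = vehicle_capacity[0] - demand
--                         current_battery = battery_capacity[0] - distance_to_client
--
--                 current_route.append(depot_index)
--                 routes[0].append(current_route)
--                 total_distance += calculate_route_distance(current_route, distance_matrix)
--
--                 # Construir rota para o veículo 2
--                 current_route = [depot_index]
--                 current_capacity = vehicle_capacity[1]
--                 current_battery = battery_capacity[1]
--
--                 for client in perm2:
--                     demand = demands[list(locations.keys())[client]]
--                     distance_to_client = distance_matrix[current_route[-1]][client]
--                     distance_back_to_depot = distance_matrix[client][depot_index]
--
--                     if current_capacity >= demand and current_battery >= (distance_to_client + distance_back_to_depot):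
--                         current_route.append(client)
--                         current_capacity -= demand
--                         current_battery -= distance_to_client
--                     else:
--                         current_route.append(depot_index)
--                         routes[1].append(current_route)
--                         total_distance += calculate_route_distance(current_route, distance_matrix)
--                         current_route = [depot_index, client]
--                         current_capacity = vehicle_capacity[1] - demand
--                         current_battery = battery_capacity[1] - distance_to_client
--
--                 current_route.append(depot_index)
--                 routes[1].append(current_route)
--                 total_distance += calculate_route_distance(current_route, distance_matrix)
--
--                 # Verificar se a solução atual é melhor
--                 if total_distance < best_distance:
--                     best_distance = total_distance
--                     best_routes = routes
--
--     return best_routes, best_distance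
-- ===== SOURCE B (Python) =====
-- import itertools
--
-- _NAMES = ["Depósito", "A", "B", "C", "D", "E", "F"]
--
-- def _vehicle_plan(perm, distance_matrix, demands, cap0, bat0):
--     routes = []
--     total = 0
--     cur = [0]
--     cap = cap0
--     bat = bat0
--     for client in perm:
--         demand = demands[_NAMES[client]]
--         dist_to = distance_matrix[cur[-1]][client]
--         back = distance_matrix[client][0]
--         if cap >= demand and bat >= dist_to + back:
--             cur.append(client)
--             cap -= demand
--             bat -= dist_to
--         else:
--             cur.append(0)
--             routes.append(cur)
--             total += sum(distance_matrix[cur[i]][cur[i + 1]] for i in range(len(cur) - 1))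
--             cur = [0, client]
--             cap = cap0 - demand
--             bat = bat0 - dist_to
--     cur.append(0)
--     routes.append(cur)
--     total += sum(distance_matrix[cur[i]][cur[i + 1]] for i in range(len(cur) - 1))
--     return routes, total
--
-- def branch_and_bound_two_vehicles(distance_matrix, demands, vehicle_capacity, battery_capacity):
--     num_clients = len(demands) - 1
--     clients = list(range(1, num_clients + 1))
--     best = None
--     for split in itertools.combinations(clients, len(clients) // 2):
--         rest = [c for c in clients if c not in split]
--         r1, c1 = min((_vehicle_plan(p, distance_matrix, demands, vehicle_capacity[0], battery_capacity[0])
--                       for p in itertools.permutations(split)), key=lambda t: t[1])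
--         r2, c2 = min((_vehicle_plan(p, distance_matrix, demands, vehicle_capacity[1], battery_capacity[1])
--                       for p in itertools.permutations(rest)), key=lambda t: t[1])
--         total = c1 + c2
--         if best is None or total < best[1]:
--             best = ([r1, r2], total)
--     return best
-- ===== Notes on version B (the rewrite author's own statement) =====
-- stated objective: alternative
-- what changed: A enumerates every (perm1, perm2) pair per client split and re-evaluates both vehicles jointly; B exploits that the two vehicles' costs are independent and, per split, finds each vehicle's first-minimal permutation separately and combines them (k1!+k2! plans per split instead of k1!*k2! pairs; the client count is capped at 6 by the fixed location table, so this is not measurable on the generated inputs).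
import Mathlib
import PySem

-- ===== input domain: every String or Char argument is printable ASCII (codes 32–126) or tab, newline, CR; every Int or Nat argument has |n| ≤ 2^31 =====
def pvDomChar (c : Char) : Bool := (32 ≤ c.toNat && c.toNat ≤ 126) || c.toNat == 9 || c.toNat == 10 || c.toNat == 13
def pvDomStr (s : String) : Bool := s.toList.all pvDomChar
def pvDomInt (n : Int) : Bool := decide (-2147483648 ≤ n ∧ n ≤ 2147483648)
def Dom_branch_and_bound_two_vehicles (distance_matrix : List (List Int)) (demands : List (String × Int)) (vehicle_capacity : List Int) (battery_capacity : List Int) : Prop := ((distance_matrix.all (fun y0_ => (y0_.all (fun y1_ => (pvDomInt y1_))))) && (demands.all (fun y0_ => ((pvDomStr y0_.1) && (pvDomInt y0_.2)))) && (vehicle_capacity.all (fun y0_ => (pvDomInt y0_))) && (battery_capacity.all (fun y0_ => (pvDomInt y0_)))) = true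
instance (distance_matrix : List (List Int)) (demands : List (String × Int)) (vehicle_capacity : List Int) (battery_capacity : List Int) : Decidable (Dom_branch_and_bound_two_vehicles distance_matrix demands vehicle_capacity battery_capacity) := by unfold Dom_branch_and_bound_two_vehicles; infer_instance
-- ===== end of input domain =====

-- B replaces A's joint enumeration of (perm1, perm2) pairs per split by two independent
-- per-vehicle minimisations (the two vehicles' costs are independent); objective: alternative.

-- ===== SHARED HELPERS (the fixed `locations` key list and the greedy route builder,
--        identical in both Pythons: A has the loop inline, B as its helper `_vehicle_plan`) =====

-- list(locations.keys()) of the module-level constant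
def pvNames : List String := ["Depósito", "A", "B", "C", "D", "E", "F"]

-- distance_matrix[i][j]; out-of-range defaults to 0 (Python raises there; excluded by Pre_)
def pvMGet (dm : List (List Int)) (i j : Int) : Int :=
  (PySem.List.pyGet? ((PySem.List.pyGet? dm i).getD []) j).getD 0

-- calculate_route_distance
def pvRouteDistance (route : List Int) (dm : List (List Int)) : Int :=
  (List.range (route.length - 1)).foldl
    (fun acc i =>
      acc + pvMGet dm ((PySem.List.pyGet? route (i : Int)).getD 0)
                      ((PySem.List.pyGet? route ((i : Int) + 1)).getD 0)) 0

-- the greedy per-vehicle loop of A (inline, twice) and of B (`_vehicle_plan`):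
-- state = (routes, total, current_route, current_capacity, current_battery)
def pvVehiclePlan (dm : List (List Int)) (demands : List (String × Int))
    (cap0 bat0 : Int) (perm : List Int) : List (List Int) × Int :=
  let s := perm.foldl
    (fun (st : List (List Int) × Int × List Int × Int × Int) client =>
      let routes := st.1
      let total := st.2.1
      let cur := st.2.2.1
      let cap := st.2.2.2.1
      let bat := st.2.2.2.2
      let demand := (List.lookup ((PySem.List.pyGet? pvNames client).getD "") demands).getD 0
      let dto := pvMGet dm ((PySem.List.pyGet? cur (-1)).getD 0) client
      let back := pvMGet dm client 0
      if demand ≤ cap ∧ dto + back ≤ bat then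
        (routes, total, cur ++ [client], cap - demand, bat - dto)
      else
        let cur' := cur ++ [0]
        (routes ++ [cur'], total + pvRouteDistance cur' dm, [0, client], cap0 - demand, bat0 - dto))
    ([], 0, [0], cap0, bat0)
  let fin := s.2.2.1 ++ [0]
  (s.1 ++ [fin], s.2.1 + pvRouteDistance fin dm)

-- itertools.combinations (lexicographic by position)
def pvCombinations : List Int → Nat → List (List Int)
  | _, 0 => [[]]
  | [], _ + 1 => []
  | x :: xs, k + 1 => (pvCombinations xs k).map (fun c => x :: c) ++ pvCombinations xs (k + 1)

-- itertools.permutations (selection by position, lexicographic)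
def pvPerms (l : List Int) : List (List Int) :=
  if l.isEmpty then [[]]
  else (List.range l.length).attach.flatMap
    (fun i => (pvPerms (l.eraseIdx i.1)).map (fun p => l.getD i.1 0 :: p))
termination_by l.length
decreasing_by
  have hi : i.1 < l.length := List.mem_range.mp i.2
  simp [List.length_eraseIdx, hi]
  omega

-- ===== PORT A =====

-- A's `if total_distance < best_distance` update, with best_distance = inf encoded as none
def pvUpd (acc : List (List (List Int)) × Option Int) (c : List (List (List Int)) × Int) :
    List (List (List Int)) × Option Int :=
  match acc.2 with
  | none => (c.1, some c.2)
  | some b => if c.2 < b then (c.1, some c.2) else acc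

def branch_and_bound_two_vehicles (distance_matrix : List (List Int)) (demands : List (String × Int)) (vehicle_capacity : List Int) (battery_capacity : List Int) : List (List (List Int)) × Int :=
  let numClients : Int := (demands.length : Int) - 1
  let clients := PySem.List.pyRange 1 (numClients + 1) 1
  let res := (pvCombinations clients (clients.length / 2)).foldl
    (fun acc split =>
      (pvPerms split).foldl
        (fun acc p1 =>
          (pvPerms (clients.filter (fun c => !(split.contains c)))).foldl
            (fun acc p2 =>
              let pl1 := pvVehiclePlan distance_matrix demands
                ((PySem.List.pyGet? vehicle_capacity 0).getD 0) ((PySem.List.pyGet? battery_capacity 0).getD 0) p1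
              let pl2 := pvVehiclePlan distance_matrix demands
                ((PySem.List.pyGet? vehicle_capacity 1).getD 0) ((PySem.List.pyGet? battery_capacity 1).getD 0) p2
              pvUpd acc ([pl1.1, pl2.1], pl1.2 + pl2.2))
            acc)
        acc)
    ([[], []], (none : Option Int))
  (res.1, res.2.getD 0)

-- ===== PORT B =====

-- `best = None` / `if best is None or total < best[1]` — also the combining step of Python's min
def pvStep {γ : Type} (acc : Option (γ × Int)) (x : γ × Int) : Option (γ × Int) :=
  match acc with
  | none => some x
  | some b => if x.2 < b.2 then some x else some b

-- min(candidates, key=lambda t: t[1]): first element with minimal second component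
def pvSelectMin {γ : Type} (l : List (γ × Int)) : Option (γ × Int) :=
  l.foldl pvStep none

def branch_and_bound_two_vehicles_alt (distance_matrix : List (List Int)) (demands : List (String × Int)) (vehicle_capacity : List Int) (battery_capacity : List Int) : List (List (List Int)) × Int :=
  let numClients : Int := (demands.length : Int) - 1
  let clients := PySem.List.pyRange 1 (numClients + 1) 1
  let best := (pvCombinations clients (clients.length / 2)).foldl
    (fun best split =>
      let m1 := (pvSelectMin ((pvPerms split).map
        (pvVehiclePlan distance_matrix demands
          ((PySem.List.pyGet? vehicle_capacity 0).getD 0) ((PySem.List.pyGet? battery_capacity 0).getD 0)))).getD ([], 0)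
      let m2 := (pvSelectMin ((pvPerms (clients.filter (fun c => !(split.contains c)))).map
        (pvVehiclePlan distance_matrix demands
          ((PySem.List.pyGet? vehicle_capacity 1).getD 0) ((PySem.List.pyGet? battery_capacity 1).getD 0)))).getD ([], 0)
      pvStep best ([m1.1, m2.1], m1.2 + m2.2))
    (none : Option (List (List (List Int)) × Int))
  best.getD ([[], []], 0)

-- ===== PRECONDITION & SPEC =====
-- Pre_ excludes exactly the inputs where Python A raises: an IndexError on the fixed 7-name
-- location list (more than 7 demand entries), on distance_matrix rows/columns it indexes
-- (indices 0..len(demands)-1, and [0][0] even with no clients), on vehicle/battery capacity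
-- lists shorter than 2, or a KeyError looking up a client's location name in demands.
def Pre_branch_and_bound_two_vehicles (distance_matrix : List (List Int)) (demands : List (String × Int)) (vehicle_capacity : List Int) (battery_capacity : List Int) : Prop :=
  demands.length ≤ 7 ∧
  max 1 demands.length ≤ distance_matrix.length ∧
  (∀ r ∈ distance_matrix.take (max 1 demands.length), max 1 demands.length ≤ r.length) ∧
  2 ≤ vehicle_capacity.length ∧ 2 ≤ battery_capacity.length ∧
  (∀ name ∈ (pvNames.drop 1).take (demands.length - 1), (List.lookup name demands) ≠ none)
instance (distance_matrix : List (List Int)) (demands : List (String × Int)) (vehicle_capacity : List Int) (battery_capacity : List Int) : Decidable (Pre_branch_and_bound_two_vehicles distance_matrix demands vehicle_capacity battery_capacity) := by unfold Pre_branch_and_bound_two_vehicles; infer_instance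

def pvWitness_branch_and_bound_two_vehicles : List (List Int) × (List (String × Int)) × List Int × List Int :=
  ([[0, 1], [1, 0]], [("A", 1), ("B", 2)], [10, 10], [10, 10])

def Spec_branch_and_bound_two_vehicles (distance_matrix : List (List Int)) (demands : List (String × Int)) (vehicle_capacity : List Int) (battery_capacity : List Int) (out : List (List (List Int)) × Int) : Prop := out = branch_and_bound_two_vehicles_alt distance_matrix demands vehicle_capacity battery_capacity
instance (distance_matrix : List (List Int)) (demands : List (String × Int)) (vehicle_capacity : List Int) (battery_capacity : List Int) (out : List (List (List Int)) × Int) : Decidable (Spec_branch_and_bound_two_vehicles distance_matrix demands vehicle_capacity battery_capacity out) := by unfold Spec_branch_and_bound_two_vehicles; infer_instance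

-- ===== CLAIM (what is proved, stated in full; the proofs are below) =====
def Claim_equal_branch_and_bound_two_vehicles : Prop := ∀ (distance_matrix : List (List Int)) (demands : List (String × Int)) (vehicle_capacity : List Int) (battery_capacity : List Int), Dom_branch_and_bound_two_vehicles distance_matrix demands vehicle_capacity battery_capacity → Pre_branch_and_bound_two_vehicles distance_matrix demands vehicle_capacity battery_capacity → Spec_branch_and_bound_two_vehicles distance_matrix demands vehicle_capacity battery_capacity (branch_and_bound_two_vehicles distance_matrix demands vehicle_capacity battery_capacity)

-- ===== LEMMAS AND PROOFS =====

theorem pv_foldl_flatMap {α β σ : Type} (g : α → List β) (f : σ → β → σ) (l : List α) :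
    ∀ i : σ, (l.flatMap g).foldl f i = l.foldl (fun acc a => (g a).foldl f acc) i := by
  induction l with
  | nil => intro i; rfl
  | cons x xs ih => intro i; simp [List.flatMap_cons, List.foldl_append, ih]

theorem pvStep_none {γ : Type} (x : γ × Int) : pvStep none x = some x := rfl

theorem pvStep_some {γ : Type} (b x : γ × Int) :
    pvStep (some b) x = if x.2 < b.2 then some x else some b := rfl

theorem pvStep_foldl_char {γ : Type} (l : List (γ × Int)) : ∀ b : γ × Int,
    (l.foldl pvStep none = none → l.foldl pvStep (some b) = some b) ∧
    (∀ r, l.foldl pvStep none = some r →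
      l.foldl pvStep (some b) = if r.2 < b.2 then some r else some b) := by
  induction l with
  | nil =>
    intro b
    exact ⟨fun _ => rfl, fun r hr => by simp at hr⟩
  | cons x xs ih =>
    intro b
    have hxnone : (x :: xs).foldl pvStep none = xs.foldl pvStep (some x) := by
      rw [List.foldl_cons, pvStep_none]
    constructor
    · intro h0
      rw [hxnone] at h0
      cases hh : xs.foldl pvStep none with
      | none =>
        have := (ih x).1 hh
        rw [this] at h0
        simp at h0
      | some r =>
        have := (ih x).2 r hh
        rw [this] at h0
        split_ifs at h0
    · intro r hr
      rw [hxnone] at hr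
      by_cases hxb : x.2 < b.2
      · have e1 : (x :: xs).foldl pvStep (some b) = xs.foldl pvStep (some x) := by
          rw [List.foldl_cons, pvStep_some, if_pos hxb]
        rw [e1]
        cases hh : xs.foldl pvStep none with
        | none =>
          have hx := (ih x).1 hh
          rw [hx] at hr ⊢
          cases hr
          rw [if_pos hxb]
        | some r0 =>
          have hx := (ih x).2 r0 hh
          rw [hx] at hr ⊢
          by_cases h0 : r0.2 < x.2
          · rw [if_pos h0] at hr ⊢
            injection hr with hrr
            rw [← hrr, if_pos (by omega : r0.2 < b.2)]
          · rw [if_neg h0] at hr ⊢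
            injection hr with hrr
            rw [← hrr, if_pos hxb]
      · have e1 : (x :: xs).foldl pvStep (some b) = xs.foldl pvStep (some b) := by
          rw [List.foldl_cons, pvStep_some, if_neg hxb]
        rw [e1]
        cases hh : xs.foldl pvStep none with
        | none =>
          have hx := (ih x).1 hh
          have hb := (ih b).1 hh
          rw [hx] at hr
          injection hr with hrr
          rw [← hrr, hb, if_neg hxb]
        | some r0 =>
          have hx := (ih x).2 r0 hh
          have hb := (ih b).2 r0 hh
          rw [hx] at hr
          rw [hb]
          by_cases h0 : r0.2 < x.2
          · rw [if_pos h0] at hr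
            injection hr with hrr
            rw [← hrr]
          · rw [if_neg h0] at hr
            injection hr with hrr
            rw [← hrr, if_neg (by omega : ¬ r0.2 < b.2), if_neg hxb]

theorem pvStep_foldl_some_ne_none {γ : Type} (l : List (γ × Int)) (b : γ × Int) :
    l.foldl pvStep (some b) ≠ none := by
  cases h : l.foldl pvStep none with
  | none => rw [(pvStep_foldl_char l b).1 h]; simp
  | some r =>
    rw [(pvStep_foldl_char l b).2 r h]
    split_ifs <;> simp

theorem pvSelectMin_cons_isSome {γ : Type} (x : γ × Int) (xs : List (γ × Int)) :
    ∃ m, pvSelectMin (x :: xs) = some m := by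
  have h : pvSelectMin (x :: xs) = xs.foldl pvStep (some x) := by
    unfold pvSelectMin
    rw [List.foldl_cons, pvStep_none]
  rw [h]
  cases hh : xs.foldl pvStep (some x) with
  | none => exact absurd hh (pvStep_foldl_some_ne_none xs x)
  | some m => exact ⟨m, rfl⟩

theorem pvStep_foldl_map_shift {γ δ : Type} (h : γ → δ) (K : Int) (l : List (γ × Int)) :
    ∀ o : Option (γ × Int),
      (l.map (fun x => (h x.1, K + x.2))).foldl pvStep (o.map (fun m => (h m.1, K + m.2))) =
        (l.foldl pvStep o).map (fun m => (h m.1, K + m.2)) := by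
  induction l with
  | nil => intro o; rfl
  | cons x xs ih =>
    intro o
    have hstep : pvStep (o.map (fun m => (h m.1, K + m.2))) ((fun x => (h x.1, K + x.2)) x) =
        (pvStep o x).map (fun m => (h m.1, K + m.2)) := by
      cases o with
      | none => rfl
      | some b =>
        rw [Option.map_some, pvStep_some, pvStep_some]
        by_cases hb : x.2 < b.2
        · rw [if_pos hb, if_pos (show ((h x.1, K + x.2) : δ × Int).2 < ((h b.1, K + b.2) : δ × Int).2 by
            simp only []
            omega)]
          rfl
        · rw [if_neg hb, if_neg (show ¬ ((h x.1, K + x.2) : δ × Int).2 < ((h b.1, K + b.2) : δ × Int).2 by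
            simp only []
            omega)]
          rfl
    simp only [List.map_cons, List.foldl_cons, hstep]
    exact ih (pvStep o x)

theorem pvStep_prod {γ δ ε : Type} (g : γ → δ → ε) (C2 : List (δ × Int)) (m2 : δ × Int)
    (h2 : C2.foldl pvStep none = some m2) (C1 : List (γ × Int)) :
    ∀ m1 : γ × Int, C1.foldl pvStep none = some m1 →
      (C1.flatMap (fun a => C2.map (fun b => (g a.1 b.1, a.2 + b.2)))).foldl pvStep none =
        some (g m1.1 m2.1, m1.2 + m2.2) := by
  induction C1 with
  | nil => intro m1 h1; exact absurd h1 (by simp)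
  | cons a rest ih =>
    intro m1 h1
    have hblock : (C2.map (fun b => (g a.1 b.1, a.2 + b.2))).foldl pvStep none =
        some (g a.1 m2.1, a.2 + m2.2) := by
      have := pvStep_foldl_map_shift (g a.1) a.2 C2 none
      simp only [Option.map] at this
      rw [this, h2]
    have hsplit : ((a :: rest).flatMap (fun a => C2.map (fun b => (g a.1 b.1, a.2 + b.2)))).foldl pvStep none =
        (rest.flatMap (fun a => C2.map (fun b => (g a.1 b.1, a.2 + b.2)))).foldl pvStep
          (some (g a.1 m2.1, a.2 + m2.2)) := by
      simp [List.flatMap_cons, List.foldl_append, hblock]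
    rw [hsplit]
    have h1' : rest.foldl pvStep (some a) = some m1 := by
      rw [← h1, List.foldl_cons, pvStep_none]
    cases hr : rest.foldl pvStep none with
    | none =>
      cases rest with
      | nil =>
        simp only [List.foldl_nil] at h1'
        cases h1'
        simp
      | cons y ys =>
        have : (y :: ys).foldl pvStep none = ys.foldl pvStep (some y) := by
          rw [List.foldl_cons, pvStep_none]
        rw [this] at hr
        exact absurd hr (pvStep_foldl_some_ne_none ys y)
    | some mr =>
      have hm1 : (if mr.2 < a.2 then some mr else some a) = some m1 := by
        rw [← (pvStep_foldl_char rest a).2 mr hr]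
        exact h1'
      have hrest := ih mr hr
      rw [(pvStep_foldl_char _ _).2 _ hrest]
      by_cases hlt : mr.2 < a.2
      · rw [if_pos hlt] at hm1
        injection hm1 with hmm
        rw [← hmm, if_pos (show ((g mr.1 m2.1, mr.2 + m2.2) : ε × Int).2 < ((g a.1 m2.1, a.2 + m2.2) : ε × Int).2 by
          simp only []
          omega)]
      · rw [if_neg hlt] at hm1
        injection hm1 with hmm
        rw [← hmm, if_neg (show ¬ ((g mr.1 m2.1, mr.2 + m2.2) : ε × Int).2 < ((g a.1 m2.1, a.2 + m2.2) : ε × Int).2 by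
          simp only []
          omega)]

theorem pvUpd_foldl_some' (cands : List (List (List (List Int)) × Int)) :
    ∀ (g0 : List (List (List Int))) (b0 : Int),
      cands.foldl pvUpd (g0, some b0) =
        (fun m => (m.1, some m.2)) ((cands.foldl pvStep (some (g0, b0))).getD (g0, b0)) := by
  induction cands with
  | nil => intro g0 b0; rfl
  | cons x xs ih =>
    intro g0 b0
    have hupd : pvUpd (g0, some b0) x = if x.2 < b0 then (x.1, some x.2) else (g0, some b0) := rfl
    have hstep : pvStep (some (g0, b0)) x = if x.2 < b0 then some x else some (g0, b0) := rfl
    simp only [List.foldl_cons, hupd, hstep]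
    by_cases hb : x.2 < b0
    · rw [if_pos hb, if_pos hb, ih x.1 x.2]
      obtain ⟨m, hm⟩ : ∃ m, xs.foldl pvStep (some ((x.1, x.2) : List (List (List Int)) × Int)) = some m := by
        cases h : xs.foldl pvStep (some ((x.1, x.2) : List (List (List Int)) × Int)) with
        | none => exact absurd h (pvStep_foldl_some_ne_none xs _)
        | some m => exact ⟨m, rfl⟩
      simp only [Prod.mk.eta] at hm ⊢
      rw [hm]
      rfl
    · rw [if_neg hb, if_neg hb, ih g0 b0]

theorem pvUpd_foldl_none (cands : List (List (List (List Int)) × Int)) (rs : List (List (List Int))) :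
    cands.foldl pvUpd (rs, none) =
      (cands.foldl pvStep none).elim (rs, (none : Option Int)) (fun m => (m.1, some m.2)) := by
  cases cands with
  | nil => rfl
  | cons x xs =>
    have h1 : (x :: xs).foldl pvUpd (rs, none) = xs.foldl pvUpd (x.1, some x.2) := rfl
    have h2 : (x :: xs).foldl pvStep none = xs.foldl pvStep (some x) := by
      rw [List.foldl_cons, pvStep_none]
    rw [h1, h2, pvUpd_foldl_some']
    obtain ⟨m, hm⟩ : ∃ m, xs.foldl pvStep (some x) = some m := by
      cases h : xs.foldl pvStep (some x) with
      | none => exact absurd h (pvStep_foldl_some_ne_none xs x)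
      | some m => exact ⟨m, rfl⟩
    rw [hm]
    rfl

theorem pvPerms_ne_nil (l : List Int) : pvPerms l ≠ [] := by
  fun_induction pvPerms l with
  | case1 l h => simp
  | case2 l h ih =>
    have hlen : 0 < l.length := by
      cases l with
      | nil => simp at h
      | cons a b => simp
    have h0 : (0 : Nat) ∈ List.range l.length := List.mem_range.mpr hlen
    intro hnil
    rw [List.flatMap_eq_nil_iff] at hnil
    have := hnil ⟨0, h0⟩ (List.mem_attach _ _)
    rw [List.map_eq_nil_iff] at this
    exact ih ⟨0, h0⟩ this

theorem pvSelectMin_map_perms_isSome {γ : Type} (s : List Int) (f : List Int → γ × Int) :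
    ∃ m, pvSelectMin ((pvPerms s).map f) = some m := by
  cases hp : pvPerms s with
  | nil => exact absurd hp (pvPerms_ne_nil s)
  | cons p ps =>
    rw [List.map_cons]
    exact pvSelectMin_cons_isSome _ _

-- the candidate list of one split of A's search (proof-only helper)
def pvBlock (plan1 plan2 : List Int → List (List Int) × Int) (w : List Int → List Int)
    (split : List Int) : List (List (List (List Int)) × Int) :=
  (pvPerms split).flatMap
    (fun p1 => (pvPerms (w split)).map
      (fun p2 => ([(plan1 p1).1, (plan2 p2).1], (plan1 p1).2 + (plan2 p2).2)))

theorem pv_final (o : Option (List (List (List Int)) × Int)) :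
    ((o.elim ([[], []], (none : Option Int)) (fun m => (m.1, some m.2))).1,
     (o.elim ([[], []], (none : Option Int)) (fun m => (m.1, some m.2))).2.getD 0) =
      o.getD ([[], []], 0) := by
  cases o <;> rfl

theorem pv_bridge (plan1 plan2 : List Int → List (List Int) × Int)
    (w : List Int → List Int) (combos : List (List Int)) :
    ((combos.foldl
        (fun acc split =>
          (pvPerms split).foldl
            (fun acc p1 =>
              (pvPerms (w split)).foldl
                (fun acc p2 =>
                  pvUpd acc ([(plan1 p1).1, (plan2 p2).1], (plan1 p1).2 + (plan2 p2).2))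
                acc)
            acc)
        ([[], []], (none : Option Int))).1,
     (combos.foldl
        (fun acc split =>
          (pvPerms split).foldl
            (fun acc p1 =>
              (pvPerms (w split)).foldl
                (fun acc p2 =>
                  pvUpd acc ([(plan1 p1).1, (plan2 p2).1], (plan1 p1).2 + (plan2 p2).2))
                acc)
            acc)
        ([[], []], (none : Option Int))).2.getD 0)
    = (combos.foldl
        (fun best split =>
          pvStep best
            ([((pvSelectMin ((pvPerms split).map plan1)).getD ([], 0)).1,
              ((pvSelectMin ((pvPerms (w split)).map plan2)).getD ([], 0)).1],
             ((pvSelectMin ((pvPerms split).map plan1)).getD ([], 0)).2 +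
             ((pvSelectMin ((pvPerms (w split)).map plan2)).getD ([], 0)).2))
        (none : Option (List (List (List Int)) × Int))).getD ([[], []], 0) := by
  have hfun : (fun (acc : List (List (List Int)) × Option Int) (split : List Int) =>
        (pvPerms split).foldl
          (fun acc p1 =>
            (pvPerms (w split)).foldl
              (fun acc p2 =>
                pvUpd acc ([(plan1 p1).1, (plan2 p2).1], (plan1 p1).2 + (plan2 p2).2))
              acc)
          acc)
      = fun acc split => (pvBlock plan1 plan2 w split).foldl pvUpd acc := by
    funext acc s
    simp only [pvBlock]
    rw [pv_foldl_flatMap]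
    congr 1
    funext a p1
    rw [List.foldl_map]
  have stepBlock : ∀ (s : List Int) (o : Option (List (List (List Int)) × Int)),
      (pvBlock plan1 plan2 w s).foldl pvStep o =
        pvStep o
          ([((pvSelectMin ((pvPerms s).map plan1)).getD ([], 0)).1,
            ((pvSelectMin ((pvPerms (w s)).map plan2)).getD ([], 0)).1],
           ((pvSelectMin ((pvPerms s).map plan1)).getD ([], 0)).2 +
           ((pvSelectMin ((pvPerms (w s)).map plan2)).getD ([], 0)).2) := by
    intro s o
    obtain ⟨m1, hm1⟩ := pvSelectMin_map_perms_isSome s plan1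
    obtain ⟨m2, hm2⟩ := pvSelectMin_map_perms_isSome (w s) plan2
    have hb : pvBlock plan1 plan2 w s = ((pvPerms s).map plan1).flatMap
        (fun a => (((pvPerms (w s)).map plan2)).map
          (fun b => (([a.1, b.1], a.2 + b.2) : List (List (List Int)) × Int))) := by
      simp only [pvBlock, List.flatMap_map, List.map_map, Function.comp_def]
    have hnone : (pvBlock plan1 plan2 w s).foldl pvStep none = some ([m1.1, m2.1], m1.2 + m2.2) := by
      rw [hb]
      exact pvStep_prod (fun x y => [x, y]) _ m2 hm2 _ m1 hm1
    rw [hm1, hm2]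
    simp only [Option.getD_some]
    cases o with
    | none => exact hnone
    | some b =>
      rw [(pvStep_foldl_char _ b).2 _ hnone]
      rfl
  have hsteps : (fun (o : Option (List (List (List Int)) × Int)) (s : List Int) =>
        (pvBlock plan1 plan2 w s).foldl pvStep o)
      = fun best split =>
          pvStep best
            ([((pvSelectMin ((pvPerms split).map plan1)).getD ([], 0)).1,
              ((pvSelectMin ((pvPerms (w split)).map plan2)).getD ([], 0)).1],
             ((pvSelectMin ((pvPerms split).map plan1)).getD ([], 0)).2 +
             ((pvSelectMin ((pvPerms (w split)).map plan2)).getD ([], 0)).2) := by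
    funext o s
    exact stepBlock s o
  rw [hfun, ← pv_foldl_flatMap (pvBlock plan1 plan2 w) pvUpd combos ([[], []], (none : Option Int)),
     pvUpd_foldl_none, pv_foldl_flatMap, hsteps]
  exact pv_final _

-- ===== VERDICT (by name: the statement is the Claim_ definition above) =====
theorem branch_and_bound_two_vehicles_spec : Claim_equal_branch_and_bound_two_vehicles := by
  intro dm demands vc bc _ _
  unfold Spec_branch_and_bound_two_vehicles
  unfold branch_and_bound_two_vehicles branch_and_bound_two_vehicles_alt
  exact pv_bridge
    (pvVehiclePlan dm demands ((PySem.List.pyGet? vc 0).getD 0) ((PySem.List.pyGet? bc 0).getD 0))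
    (pvVehiclePlan dm demands ((PySem.List.pyGet? vc 1).getD 0) ((PySem.List.pyGet? bc 1).getD 0))
    (fun split => (PySem.List.pyRange 1 (((demands.length : Int) - 1) + 1) 1).filter
      (fun c => !(split.contains c)))
    (pvCombinations (PySem.List.pyRange 1 (((demands.length : Int) - 1) + 1) 1)
      ((PySem.List.pyRange 1 (((demands.length : Int) - 1) + 1) 1).length / 2))
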